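-- pv_equiv track=rewrite | github.com/lewingan/eam-architect-council | eam_council/council/lead_agent.py | _validator_needs_clarification
-- ===== SOURCE A (Python) =====
-- def _validator_needs_clarification(result_text: str) -> tuple[bool, str | None, str | None]:
--     """Parse validator output for clarification routing."""
--     text = result_text.strip()
--     if text == "ALIGNED":
--         return False, None, None
--     if not text.startswith("NEEDS_CLARIFICATION"):
--         return False, None, None
--
--     target = None
--     reason = None
--     for part in [p.strip() for p in text.split("|")]:
--         if part.startswith("target="):
--             target = part.split("=", 1)[1].strip().lower()
--         if part.startswith("reason="):
--             reason = part.split("=", 1)[1].strip()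
--
--     return True, target, reason
-- ===== SOURCE B (Python) =====
-- def _validator_needs_clarification(result_text: str) -> tuple[bool, str | None, str | None]:
--     """Parse validator output: build a field dict in one pass, then derive target/reason."""
--     text = result_text.strip()
--     if text == "ALIGNED" or not text.startswith("NEEDS_CLARIFICATION"):
--         return False, None, None
--     fields = {}
--     for p in text.split("|"):
--         part = p.strip()
--         if "=" in part:
--             key, value = part.split("=", 1)
--             fields[key] = value
--     target = fields["target"].strip().lower() if "target" in fields else None
--     reason = fields["reason"].strip() if "reason" in fields else None
--     return True, target, reason
-- ===== Notes on version B (the rewrite author's own statement) =====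
-- stated objective: alternative
-- what changed: Replaces A's per-key stateful loop (two startswith tests mutating dedicated target/reason variables) by a generic one-pass key->value dict built from every part that carries an equals sign, with target and reason derived by dict lookup after the loop.
import Mathlib
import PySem

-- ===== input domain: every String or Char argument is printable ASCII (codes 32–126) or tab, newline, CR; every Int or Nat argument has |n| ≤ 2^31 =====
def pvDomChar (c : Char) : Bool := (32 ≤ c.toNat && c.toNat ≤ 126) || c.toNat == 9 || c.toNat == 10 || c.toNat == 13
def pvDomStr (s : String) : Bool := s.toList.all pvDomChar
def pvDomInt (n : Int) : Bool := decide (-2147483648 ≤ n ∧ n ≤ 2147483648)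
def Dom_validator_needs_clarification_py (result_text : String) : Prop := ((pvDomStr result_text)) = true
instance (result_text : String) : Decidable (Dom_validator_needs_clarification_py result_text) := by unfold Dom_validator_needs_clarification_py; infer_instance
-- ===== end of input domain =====

-- B replaces A's per-key stateful loop (mutating target/reason variables) by a generic
-- key→value dict built in one pass, with target/reason derived by lookup afterwards (simpler decomposition).

-- part.split("=", 1)[1]  (A contains this exact expression; under its startswith guards
-- index 1 always exists, so the getD defaults are never used)
def pvTailEq (part : String) : String :=
  (PySem.List.pyGet? ((PySem.Str.splitMax? part "=" 1).getD []) 1).getD ""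

-- ===== PORT A =====
-- A's loop body: the two successive ifs over the mutable (target, reason) pair
def pvStepA (s : Option String × Option String) (part : String) : Option String × Option String :=
  let s1 := if PySem.Str.startswith part "target=" then
      (some (PySem.Str.lower (PySem.Str.strip (pvTailEq part))), s.2) else s
  if PySem.Str.startswith part "reason=" then (s1.1, some (PySem.Str.strip (pvTailEq part))) else s1

def validator_needs_clarification_py (result_text : String) : Bool × Option String × Option String :=
  let text := PySem.Str.strip result_text
  if text == "ALIGNED" then (false, none, none)
  else if !(PySem.Str.startswith text "NEEDS_CLARIFICATION") then (false, none, none)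
  else
    let parts := ((PySem.Str.split? text "|").getD []).map PySem.Str.strip
    let tr := parts.foldl pvStepA ((none, none) : Option String × Option String)
    (true, tr.1, tr.2)

-- ===== PORT B =====
-- B's loop body: strip the piece and, when it carries '=', store key -> value in the dict
-- (key, value = part.split("=", 1): both indices exist when "=" in part, defaults unused)
def pvStepB (d : PySem.Dict String String) (p : String) : PySem.Dict String String :=
  let part := PySem.Str.strip p
  if PySem.Str.isIn "=" part then
    let kv := (PySem.Str.splitMax? part "=" 1).getD []
    d.insert ((PySem.List.pyGet? kv 0).getD "") ((PySem.List.pyGet? kv 1).getD "")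
  else d

def validator_needs_clarification_py_alt (result_text : String) : Bool × Option String × Option String :=
  let text := PySem.Str.strip result_text
  if text == "ALIGNED" || !(PySem.Str.startswith text "NEEDS_CLARIFICATION") then (false, none, none)
  else
    let fields := ((PySem.Str.split? text "|").getD []).foldl pvStepB PySem.Dict.empty
    (true, (fields.get? "target").map (fun v => PySem.Str.lower (PySem.Str.strip v)),
           (fields.get? "reason").map PySem.Str.strip)

-- ===== PRECONDITION & SPEC =====
def Spec_validator_needs_clarification_py (result_text : String) (out : Bool × Option String × Option String) : Prop := out = validator_needs_clarification_py_alt result_text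
instance (result_text : String) (out : Bool × Option String × Option String) : Decidable (Spec_validator_needs_clarification_py result_text out) := by unfold Spec_validator_needs_clarification_py; infer_instance

-- ===== CLAIM (what is proved, stated in full; the proofs are below) =====
def Claim_equal_validator_needs_clarification_py : Prop := ∀ (result_text : String), Dom_validator_needs_clarification_py result_text → Spec_validator_needs_clarification_py result_text (validator_needs_clarification_py result_text)

-- ===== LEMMAS AND PROOFS =====

-- splitOnMax.go with maxsplit exhausted returns the rest as one last piece, any fuel
theorem pv_go_m0 (fuel : Nat) (l cur : List Char) (acc : List (List Char)) :
    PySem.Chars.splitOnMax.go ['='] fuel 0 l cur acc = ((cur.reverse ++ l) :: acc).reverse := by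
  cases fuel with
  | zero => rw [PySem.Chars.splitOnMax.go.eq_def]
  | succ f => cases l with
    | nil => rw [PySem.Chars.splitOnMax.go.eq_def]; simp
    | cons c rest => rw [PySem.Chars.splitOnMax.go.eq_def]; simp

theorem pv_go_m1 (b : List Char) (hb : '=' ∉ b) :
    ∀ (a cur : List Char) (acc : List (List Char)) (fuel : Nat), b.length < fuel →
    PySem.Chars.splitOnMax.go ['='] fuel 1 (b ++ '=' :: a) cur acc
      = acc.reverse ++ [cur.reverse ++ b, a] := by
  induction b with
  | nil =>
    intro a cur acc fuel hf
    cases fuel with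
    | zero => omega
    | succ f =>
      rw [PySem.Chars.splitOnMax.go.eq_def]
      simp [List.isPrefixOf, pv_go_m0]
  | cons c b' ih =>
    intro a cur acc fuel hf
    have hc : (('=' : Char) == c) = false := by
      simp only [beq_eq_false_iff_ne, ne_eq]; intro hh; exact hb (hh ▸ List.mem_cons_self ..)
    cases fuel with
    | zero => omega
    | succ f =>
      rw [PySem.Chars.splitOnMax.go.eq_def]
      simp only [List.cons_append, List.isPrefixOf, hc, Bool.false_and, if_false, Nat.succ_ne_zero, Bool.false_eq_true]
      rw [ih (fun hm => hb (List.mem_cons_of_mem _ hm)) a (c :: cur) acc f (by simp at hf ⊢; omega)]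
      simp

-- split("=", 1) characterised at the first '='
theorem pv_splitMax_eq (b a : List Char) (hb : '=' ∉ b) :
    PySem.Chars.splitMax? (b ++ '=' :: a) ['='] 1 = some [b, a] := by
  rw [show PySem.Chars.splitMax? (b ++ '=' :: a) ['='] 1
      = some (PySem.Chars.splitOnMax.go ['='] ((b ++ '=' :: a).length + 1) 1 (b ++ '=' :: a) [] []) from rfl]
  rw [pv_go_m1 b hb a [] [] _ (by simp)]
  simp

theorem pv_key_det (t : List Char) (ht : '=' ∉ t) :
    ∀ (b : List Char), '=' ∉ b → ∀ (r a : List Char),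
      t ++ '=' :: r = b ++ '=' :: a → t = b := by
  induction t with
  | nil =>
    intro b hb r a he
    cases b with
    | nil => rfl
    | cons d b' =>
      simp only [List.nil_append, List.cons_append, List.cons.injEq] at he
      exact absurd (by rw [← he.1]; exact List.mem_cons_self ..) hb
  | cons c t' ih =>
    intro b hb r a he
    cases b with
    | nil =>
      simp only [List.cons_append, List.nil_append, List.cons.injEq] at he
      exact absurd (by rw [he.1]; exact List.mem_cons_self ..) ht
    | cons d b' =>
      simp only [List.cons_append, List.cons.injEq] at he
      have := ih (fun hm => ht (List.mem_cons_of_mem _ hm)) b' (fun hm => hb (List.mem_cons_of_mem _ hm)) r a he.2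
      simp [he.1, this]

theorem pv_startswith_decomp (t b a : List Char) (ht : '=' ∉ t) (hb : '=' ∉ b) :
    PySem.Chars.startswith (b ++ '=' :: a) (t ++ ['=']) = true ↔ t = b := by
  rw [PySem.Chars.startswith_iff]
  constructor
  · rintro ⟨r, hr⟩
    exact pv_key_det t ht b hb r a (by simpa using hr)
  · rintro rfl
    exact ⟨a, by simp⟩

theorem pv_decomp (cs : List Char) (h : '=' ∈ cs) :
    ∃ b a, cs = b ++ '=' :: a ∧ '=' ∉ b := by
  induction cs with
  | nil => cases h
  | cons c rest ih =>
    by_cases hc : c = '='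
    · exact ⟨[], rest, by simp [hc], by simp⟩
    · have hm : '=' ∈ rest := by cases h with
        | head => exact absurd rfl hc
        | tail _ hm => exact hm
      obtain ⟨b, a, hba, hnb⟩ := ih hm
      exact ⟨c :: b, a, by simp [hba],
        by simp only [List.mem_cons, not_or]; exact ⟨fun hh => hc hh.symm, hnb⟩⟩

theorem pv_sw_key (part : String) (b a : List Char) (key : String)
    (hba : part.toList = b ++ '=' :: a) (hnb : '=' ∉ b) (hk : '=' ∉ key.toList) :
    PySem.Str.startswith part (key ++ "=") = decide (b = key.toList) := by
  rw [PySem.Str.startswith_eq, show (key ++ "=").toList = key.toList ++ ['='] by simp, hba]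
  have hiff := pv_startswith_decomp key.toList b a hk hnb
  cases h : PySem.Chars.startswith (b ++ '=' :: a) (key.toList ++ ['=']) with
  | false =>
    have : ¬ b = key.toList := fun hh => by rw [hiff.mpr hh.symm] at h; cases h
    simp [this]
  | true => simp [(hiff.mp h).symm]

-- membership of '=' decided by isIn
theorem pv_startswith_noeq (cs t : List Char) (h : '=' ∉ cs) :
    PySem.Chars.startswith cs (t ++ ['=']) = false := by
  by_contra hc
  rw [Bool.not_eq_false, PySem.Chars.startswith_iff] at hc
  exact h (hc.subset (by simp))

theorem pv_isIn_iff (part : String) :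
    PySem.Str.isIn "=" part = true ↔ '=' ∈ part.toList := by
  rw [PySem.Str.isIn_eq, PySem.Chars.isIn_iff_infix]
  show ['='] <:+: part.toList ↔ _
  constructor
  · intro hin; exact hin.subset (by simp)
  · intro hm
    obtain ⟨s, t, hst⟩ := List.append_of_mem hm
    exact ⟨s, t, by simp [hst]⟩

-- A's stateful pass over the stripped parts computes exactly the two lookups in B's dict
theorem pv_loop (ps : List String) :
    ∀ (d : PySem.Dict String String),
    ps.foldl (fun s p => pvStepA s (PySem.Str.strip p))
      (((d.get? "target").map (fun v => PySem.Str.lower (PySem.Str.strip v)),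
        (d.get? "reason").map PySem.Str.strip))
    = ((((ps.foldl pvStepB d).get? "target").map (fun v => PySem.Str.lower (PySem.Str.strip v))),
        ((ps.foldl pvStepB d).get? "reason").map PySem.Str.strip) := by
  induction ps with
  | nil => intro d; rfl
  | cons p ps ih =>
    intro d
    rw [List.foldl_cons, List.foldl_cons]
    by_cases hIn : PySem.Str.isIn "=" (PySem.Str.strip p) = true
    · obtain ⟨b, a, hba, hnb⟩ := pv_decomp _ ((pv_isIn_iff _).mp hIn)
      have hsm : PySem.Str.splitMax? (PySem.Str.strip p) "=" 1
          = some [String.ofList b, String.ofList a] := by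
        unfold PySem.Str.splitMax?
        rw [show ("=" : String).toList = ['='] from rfl, hba, pv_splitMax_eq b a hnb]
        rfl
      have htail : pvTailEq (PySem.Str.strip p) = String.ofList a := by
        simp [pvTailEq, hsm, PySem.List.pyGet?, PySem.List.pyIdx?]
      have hT : PySem.Str.startswith (PySem.Str.strip p) "target="
          = decide (b = "target".toList) := by
        rw [show ("target=" : String) = "target" ++ "=" from rfl]
        exact pv_sw_key _ b a "target" hba hnb (by decide)
      have hR : PySem.Str.startswith (PySem.Str.strip p) "reason="
          = decide (b = "reason".toList) := by
        rw [show ("reason=" : String) = "reason" ++ "=" from rfl]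
        exact pv_sw_key _ b a "reason" hba hnb (by decide)
      have hstepB : pvStepB d p = d.insert (String.ofList b) (String.ofList a) := by
        simp only [pvStepB, hIn, if_true, hsm]
        simp [PySem.List.pyGet?, PySem.List.pyIdx?]
      by_cases hbt : b = "target".toList
      · have hkeq : String.ofList b = "target" := by rw [hbt]; exact String.ofList_toList
        have hA : pvStepA (((d.get? "target").map (fun v => PySem.Str.lower (PySem.Str.strip v)),
            (d.get? "reason").map PySem.Str.strip)) (PySem.Str.strip p)
            = (((d.insert "target" (String.ofList a)).get? "target").map (fun v => PySem.Str.lower (PySem.Str.strip v)),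
               ((d.insert "target" (String.ofList a)).get? "reason").map PySem.Str.strip) := by
          rw [PySem.Dict.get?_insert, PySem.Dict.get?_insert]
          simp only [pvStepA, hT, hR, hbt, htail]
          simp [show ("reason" : String) ≠ "target" from by decide]
        rw [hA, hstepB, hkeq, ih]
      · by_cases hbr : b = "reason".toList
        · have hkeq : String.ofList b = "reason" := by rw [hbr]; exact String.ofList_toList
          have hA : pvStepA (((d.get? "target").map (fun v => PySem.Str.lower (PySem.Str.strip v)),
              (d.get? "reason").map PySem.Str.strip)) (PySem.Str.strip p)
              = (((d.insert "reason" (String.ofList a)).get? "target").map (fun v => PySem.Str.lower (PySem.Str.strip v)),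
                 ((d.insert "reason" (String.ofList a)).get? "reason").map PySem.Str.strip) := by
            rw [PySem.Dict.get?_insert, PySem.Dict.get?_insert]
            simp only [pvStepA, hT, hR, hbr, htail]
            simp [show ("target" : String) ≠ "reason" from by decide]
          rw [hA, hstepB, hkeq, ih]
        · -- some other key: neither A's variables nor the two lookups move
          have hknt : ("target" : String) ≠ String.ofList b := by
            intro hh; exact hbt (by rw [← String.toList_ofList (l := b), ← hh])
          have hknr : ("reason" : String) ≠ String.ofList b := by
            intro hh; exact hbr (by rw [← String.toList_ofList (l := b), ← hh])
          have hA : pvStepA (((d.get? "target").map (fun v => PySem.Str.lower (PySem.Str.strip v)),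
              (d.get? "reason").map PySem.Str.strip)) (PySem.Str.strip p)
              = (((d.get? "target").map (fun v => PySem.Str.lower (PySem.Str.strip v)),
                  (d.get? "reason").map PySem.Str.strip)) := by
            simp only [pvStepA, hT, hR]
            simp [show b ≠ ['t','a','r','g','e','t'] from fun hh => hbt (by rw [hh]; rfl),
                  show b ≠ ['r','e','a','s','o','n'] from fun hh => hbr (by rw [hh]; rfl)]
          have hrec := ih (d.insert (String.ofList b) (String.ofList a))
          rw [PySem.Dict.get?_insert_of_ne _ _ hknt, PySem.Dict.get?_insert_of_ne _ _ hknr] at hrec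
          rw [hA, hstepB, hrec]
    · -- no '=': A's both startswith fail, B skips the part
      have hnm : '=' ∉ (PySem.Str.strip p).toList := fun hm => hIn ((pv_isIn_iff _).mpr hm)
      have hT : PySem.Str.startswith (PySem.Str.strip p) "target=" = false := by
        rw [PySem.Str.startswith_eq, show ("target=" : String).toList = "target".toList ++ ['='] from rfl]
        exact pv_startswith_noeq _ _ hnm
      have hR : PySem.Str.startswith (PySem.Str.strip p) "reason=" = false := by
        rw [PySem.Str.startswith_eq, show ("reason=" : String).toList = "reason".toList ++ ['='] from rfl]
        exact pv_startswith_noeq _ _ hnm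
      have hIn' : PySem.Str.isIn "=" (PySem.Str.strip p) = false := eq_false_of_ne_true hIn
      have hstepB : pvStepB d p = d := by
        simp only [pvStepB, hIn', Bool.false_eq_true, if_false]
      have hA : pvStepA (((d.get? "target").map (fun v => PySem.Str.lower (PySem.Str.strip v)),
          (d.get? "reason").map PySem.Str.strip)) (PySem.Str.strip p)
          = (((d.get? "target").map (fun v => PySem.Str.lower (PySem.Str.strip v)),
              (d.get? "reason").map PySem.Str.strip)) := by
        simp only [pvStepA, hT, hR, Bool.false_eq_true, if_false]
      rw [hA, hstepB, ih]

theorem pv_main (s : String) :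
    validator_needs_clarification_py s = validator_needs_clarification_py_alt s := by
  unfold validator_needs_clarification_py validator_needs_clarification_py_alt
  by_cases h1 : (PySem.Str.strip s == "ALIGNED") = true
  · simp [h1]
  · rw [if_neg h1]
    by_cases h2 : PySem.Str.startswith (PySem.Str.strip s) "NEEDS_CLARIFICATION" = true
    · have hno : ¬ ((PySem.Str.strip s == "ALIGNED" || !PySem.Str.startswith (PySem.Str.strip s) "NEEDS_CLARIFICATION") = true) := by
        rw [Bool.or_eq_true]
        rintro (hc | hc)
        · exact h1 hc
        · rw [h2] at hc; simp at hc
      rw [if_neg (by rw [h2]; decide), if_neg hno]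
      dsimp only
      rw [List.foldl_map]
      have h0 : ((none, none) : Option String × Option String)
          = (((PySem.Dict.empty (κ := String) (ν := String)).get? "target").map (fun v => PySem.Str.lower (PySem.Str.strip v)),
             ((PySem.Dict.empty (κ := String) (ν := String)).get? "reason").map PySem.Str.strip) := rfl
      rw [h0, pv_loop]
    · rw [Bool.not_eq_true] at h2
      rw [if_pos (by rw [h2]; decide), if_pos (by rw [h2]; simp)]

-- ===== VERDICT (by name: the statement is the Claim_ definition above) =====
theorem validator_needs_clarification_py_spec : Claim_equal_validator_needs_clarification_py := by
  intro s _
  exact pv_main s
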